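-- pv_equiv track=rewrite | github.com/joningi98/SC-T-111-PROG | tima_verkefni/Assignment_16_Top_100_Chess_players/part2.py | get_points_per_birth_year
-- ===== SOURCE A (Python) =====
-- def get_points_per_birth_year(chess_players_dict):
--     my_dict = {}
--     for chess_players_dict in chess_players_dict.items():
--         birth_year = chess_players_dict[1][3]
--         if birth_year in my_dict:
--             my_dict[birth_year][0] += 1
--             my_dict[birth_year][1] += chess_players_dict[1][2]
--         else:
--             data = [1, chess_players_dict[1][2]]
--             my_dict[birth_year] = data
--     return my_dict
-- ===== SOURCE B (Python) =====
-- def get_points_per_birth_year(chess_players_dict):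
--     # pass 1: group each player's points by birth year
--     groups = {}
--     for value in chess_players_dict.values():
--         groups[value[3]] = groups.get(value[3], []) + [value[2]]
--     # pass 2: reduce each group to [count, total points]
--     return {year: [len(pts), sum(pts)] for year, pts in groups.items()}
-- ===== Notes on version B (the rewrite author's own statement) =====
-- stated objective: alternative
-- what changed: B replaces A's fused in-place count/sum accumulation with two separate passes: first group each player's point value into a per-birth-year list, then map each group to [len, sum] in a dict comprehension.
import Mathlib
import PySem

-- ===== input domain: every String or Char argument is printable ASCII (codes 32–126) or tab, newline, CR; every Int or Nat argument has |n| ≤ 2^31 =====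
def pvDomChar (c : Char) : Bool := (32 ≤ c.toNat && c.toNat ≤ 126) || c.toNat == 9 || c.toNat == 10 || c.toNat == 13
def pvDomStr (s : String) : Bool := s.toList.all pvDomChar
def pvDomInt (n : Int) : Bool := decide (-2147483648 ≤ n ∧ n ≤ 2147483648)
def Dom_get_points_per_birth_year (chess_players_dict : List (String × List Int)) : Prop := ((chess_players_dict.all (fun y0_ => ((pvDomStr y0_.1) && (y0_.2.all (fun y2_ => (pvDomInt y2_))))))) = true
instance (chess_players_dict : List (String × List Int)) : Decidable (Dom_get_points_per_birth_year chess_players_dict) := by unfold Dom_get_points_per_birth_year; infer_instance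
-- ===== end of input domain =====

-- B separates A's fused count/sum accumulation into grouping then reduction (objective: alternative decomposition, same cost).

-- ===== PORT A =====
-- one fold: if the year is present, bump [count, sum] in place; else insert [1, points]
def get_points_per_birth_year (chess_players_dict : List (String × List Int)) : List (Int × List Int) :=
  (chess_players_dict.foldl (fun my_dict p =>
    let birth_year := (PySem.List.pyGet? p.2 3).getD 0
    let points := (PySem.List.pyGet? p.2 2).getD 0
    if my_dict.contains birth_year then
      let cur := my_dict.getD birth_year []
      my_dict.insert birth_year [(PySem.List.pyGet? cur 0).getD 0 + 1,
                                 (PySem.List.pyGet? cur 1).getD 0 + points]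
    else
      my_dict.insert birth_year [1, points]) (PySem.Dict.empty : PySem.Dict Int (List Int))).items

-- ===== PORT B =====
def pvGroupsB (chess_players_dict : List (String × List Int)) : PySem.Dict Int (List Int) :=
  chess_players_dict.foldl (fun groups p =>
    groups.insert ((PySem.List.pyGet? p.2 3).getD 0)
      (groups.getD ((PySem.List.pyGet? p.2 3).getD 0) [] ++ [(PySem.List.pyGet? p.2 2).getD 0]))
    PySem.Dict.empty

def get_points_per_birth_year_alt (chess_players_dict : List (String × List Int)) : List (Int × List Int) :=
  (pvGroupsB chess_players_dict).items.map (fun q => (q.1, [(q.2.length : Int), q.2.sum]))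

-- ===== PRECONDITION & SPEC =====
-- Pre_ excludes inputs where some player's value list has fewer than 4 entries: there A (and B) raise IndexError.
def Pre_get_points_per_birth_year (chess_players_dict : List (String × List Int)) : Prop :=
  ∀ p ∈ chess_players_dict, 4 ≤ p.2.length
instance (chess_players_dict : List (String × List Int)) : Decidable (Pre_get_points_per_birth_year chess_players_dict) := by unfold Pre_get_points_per_birth_year; infer_instance

def pvWitness_get_points_per_birth_year : (List (String × List Int)) :=
  [("Carlsen", [1, 2882, 10, 1990]), ("Caruana", [2, 2820, 8, 1992]), ("Firouzja", [3, 2790, 7, 1990])]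

def Spec_get_points_per_birth_year (chess_players_dict : List (String × List Int)) (out : List (Int × List Int)) : Prop := out = get_points_per_birth_year_alt chess_players_dict
instance (chess_players_dict : List (String × List Int)) (out : List (Int × List Int)) : Decidable (Spec_get_points_per_birth_year chess_players_dict out) := by unfold Spec_get_points_per_birth_year; infer_instance

-- ===== CLAIM (what is proved, stated in full; the proofs are below) =====
def Claim_equal_get_points_per_birth_year : Prop := ∀ (chess_players_dict : List (String × List Int)), Dom_get_points_per_birth_year chess_players_dict → Pre_get_points_per_birth_year chess_players_dict → Spec_get_points_per_birth_year chess_players_dict (get_points_per_birth_year chess_players_dict)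

-- ===== LEMMAS AND PROOFS =====

-- the reduction applied per group
def pvRed (q : Int × List Int) : Int × List Int := (q.1, [(q.2.length : Int), q.2.sum])

lemma pv_key_inj {l : List (Int × List Int)} (h : (l.map (·.1)).Nodup)
    {q : Int × List Int} {y : Int} {pts : List Int}
    (hq : q ∈ l) (hm : (y, pts) ∈ l) (hqy : q.1 = y) : q = (y, pts) := by
  induction l with
  | nil => cases hq
  | cons a t ih =>
    simp only [List.map_cons, List.nodup_cons] at h
    rcases List.mem_cons.mp hq with rfl | hq'
    · rcases List.mem_cons.mp hm with h2 | hm'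
      · exact h2.symm
      · exact absurd (List.mem_map.mpr ⟨(y, pts), hm', rfl⟩) (hqy ▸ h.1)
    · rcases List.mem_cons.mp hm with h2 | hm'
      · exact absurd (List.mem_map.mpr ⟨q, hq', by rw [hqy, ← h2]⟩) h.1
      · exact ih h.2 hq' hm'

lemma pv_inv (l : List (String × List Int)) (dB : PySem.Dict Int (List Int))
    (hnd : dB.keys.Nodup) :
    (l.foldl (fun my_dict p =>
      let birth_year := (PySem.List.pyGet? p.2 3).getD 0
      let points := (PySem.List.pyGet? p.2 2).getD 0
      if my_dict.contains birth_year then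
        let cur := my_dict.getD birth_year []
        my_dict.insert birth_year [(PySem.List.pyGet? cur 0).getD 0 + 1,
                                   (PySem.List.pyGet? cur 1).getD 0 + points]
      else
        my_dict.insert birth_year [1, points])
      (PySem.Dict.mk (dB.items.map pvRed))).items
    = ((l.foldl (fun groups p =>
        groups.insert ((PySem.List.pyGet? p.2 3).getD 0)
          (groups.getD ((PySem.List.pyGet? p.2 3).getD 0) [] ++ [(PySem.List.pyGet? p.2 2).getD 0]))
        dB).items).map pvRed := by
  induction l generalizing dB with
  | nil => simp
  | cons p l ih =>
    simp only [List.foldl_cons]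
    have hcont : (PySem.Dict.mk (dB.items.map pvRed)).contains ((PySem.List.pyGet? p.2 3).getD 0)
        = dB.contains ((PySem.List.pyGet? p.2 3).getD 0) := by
      simp [PySem.Dict.contains_eq_decide_mem_keys, PySem.Dict.keys, List.map_map, pvRed]
    by_cases hc : dB.contains ((PySem.List.pyGet? p.2 3).getD 0) = true
    · -- existing year: both sides replace the matching item
      obtain ⟨pts, hmem⟩ : ∃ pts, ((PySem.List.pyGet? p.2 3).getD 0, pts) ∈ dB.items := by
        rw [PySem.Dict.contains_iff_mem_keys] at hc
        simp only [PySem.Dict.keys, List.mem_map] at hc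
        obtain ⟨q, hq, hq1⟩ := hc
        exact ⟨q.2, by rw [← hq1]; simpa using hq⟩
      have hndk : dB.items.map (·.1) = dB.keys := rfl
      have hgetB : dB.getD ((PySem.List.pyGet? p.2 3).getD 0) [] = pts :=
        PySem.Dict.getD_of_mem_items _ hmem hnd []
      have hgetA : (PySem.Dict.mk (dB.items.map pvRed)).getD ((PySem.List.pyGet? p.2 3).getD 0) []
          = [(pts.length : Int), pts.sum] := by
        have hmem' : (((PySem.List.pyGet? p.2 3).getD 0), ([(pts.length : Int), pts.sum]))
            ∈ (PySem.Dict.mk (dB.items.map pvRed)).items :=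
          List.mem_map.mpr ⟨_, hmem, rfl⟩
        refine PySem.Dict.getD_of_mem_items _ hmem' ?_ []
        simpa [PySem.Dict.keys, List.map_map, pvRed] using hnd
      have hstep : (PySem.Dict.mk (dB.items.map pvRed)).insert ((PySem.List.pyGet? p.2 3).getD 0)
            [(PySem.List.pyGet? ((PySem.Dict.mk (dB.items.map pvRed)).getD ((PySem.List.pyGet? p.2 3).getD 0) []) 0).getD 0 + 1,
             (PySem.List.pyGet? ((PySem.Dict.mk (dB.items.map pvRed)).getD ((PySem.List.pyGet? p.2 3).getD 0) []) 1).getD 0 + (PySem.List.pyGet? p.2 2).getD 0]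
          = PySem.Dict.mk (((dB.insert ((PySem.List.pyGet? p.2 3).getD 0)
              (dB.getD ((PySem.List.pyGet? p.2 3).getD 0) [] ++ [(PySem.List.pyGet? p.2 2).getD 0])).items).map pvRed) := by
        apply PySem.Dict.ext
        rw [PySem.Dict.items_insert_of_contains _ _ (by rw [hcont]; exact hc),
            PySem.Dict.items_insert_of_contains _ _ hc]
        simp only [hgetA, hgetB, List.map_map]
        apply List.map_congr_left
        intro q hq
        by_cases hqy : q.1 = ((PySem.List.pyGet? p.2 3).getD 0)
        · have hqe : q = (((PySem.List.pyGet? p.2 3).getD 0), pts) := pv_key_inj hnd hq hmem hqy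
          subst hqe
          simp [pvRed, PySem.List.pyGet?, PySem.List.pyIdx?]
        · simp [pvRed, hqy]
      rw [if_pos (by rw [hcont]; exact hc), hstep]
      exact ih _ (PySem.Dict.nodup_keys_insert _ _ _ hnd)
    · -- new year: both sides append a fresh entry
      have hB : dB.getD ((PySem.List.pyGet? p.2 3).getD 0) [] = [] :=
        PySem.Dict.getD_of_not_contains _ _ (eq_false_of_ne_true hc)
      have hstep : (PySem.Dict.mk (dB.items.map pvRed)).insert ((PySem.List.pyGet? p.2 3).getD 0)
            [1, (PySem.List.pyGet? p.2 2).getD 0]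
          = PySem.Dict.mk (((dB.insert ((PySem.List.pyGet? p.2 3).getD 0)
              (dB.getD ((PySem.List.pyGet? p.2 3).getD 0) [] ++ [(PySem.List.pyGet? p.2 2).getD 0])).items).map pvRed) := by
        apply PySem.Dict.ext
        rw [PySem.Dict.items_insert_of_not_contains _ _ (by rw [hcont]; exact eq_false_of_ne_true hc),
            PySem.Dict.items_insert_of_not_contains _ _ (eq_false_of_ne_true hc)]
        simp [pvRed, hB]
      rw [if_neg (by rw [hcont]; exact hc), hstep]
      exact ih _ (PySem.Dict.nodup_keys_insert _ _ _ hnd)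

-- ===== VERDICT (by name: the statement is the Claim_ definition above) =====
theorem get_points_per_birth_year_spec : Claim_equal_get_points_per_birth_year := by
  intro l _ _
  unfold Spec_get_points_per_birth_year get_points_per_birth_year get_points_per_birth_year_alt pvGroupsB
  have h := pv_inv l PySem.Dict.empty (by simp [PySem.Dict.keys_empty])
  simpa [PySem.Dict.empty, pvRed] using h
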